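-- pv_equiv track=rewrite | github.com/uridmo/NetworkArchOptimization | structureanalysis/discretization.py | enumerate_beam_element
-- ===== SOURCE A (Python) =====
-- def enumerate_beam_element(nodes_lists):
--     """Creates a list containing for each beam an ordered list of its elements.
--
--     Arguments:
--         nodes_lists -- a list containing for each beam an ordered list of the
--                        node numbers along the beam
--
--     Return values:
--         elements_lists -- a list containing for each beam a list of the elements
--                           on the beam in consecutive order
--     """
--     number_of_elements=0
--     elements_lists=[]
--     #Expand the list and the number with the elements list of each beam.
--     for nodes_list in nodes_lists:
--         #Get the number of nodes on each beam.
--         number_of_elements_toadd=len(nodes_list)-1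
--
--         #Update the List and the total number accordingly.
--         new_number_of_elements = number_of_elements + number_of_elements_toadd
--         elements_lists.append(list(range(number_of_elements,
--                                          new_number_of_elements)))
--         number_of_elements = new_number_of_elements
--
--     return elements_lists
-- ===== SOURCE B (Python) =====
-- def enumerate_beam_element(nodes_lists):
--     """Creates a list containing for each beam an ordered list of its elements.
--
--     Builds the answer back-to-front with no running counter: each beam
--     contributes its zero-based element range, and all indices already in the
--     result are shifted up by that beam's element count."""
--     result = []
--     for nodes_list in reversed(nodes_lists):
--         shift = len(nodes_list) - 1
--         result = [list(range(shift))] + [[e + shift for e in ys] for ys in result]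
--     return result
-- ===== Notes on version B (the rewrite author's own statement) =====
-- stated objective: alternative
-- what changed: Replaces A's forward loop threading a running element counter with a back-to-front construction that keeps no counter at all: each beam prepends its zero-based range and shifts every index of the partial result, trading A's O(N) for an O(m*N) compositional shift-based algorithm.
import Mathlib
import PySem

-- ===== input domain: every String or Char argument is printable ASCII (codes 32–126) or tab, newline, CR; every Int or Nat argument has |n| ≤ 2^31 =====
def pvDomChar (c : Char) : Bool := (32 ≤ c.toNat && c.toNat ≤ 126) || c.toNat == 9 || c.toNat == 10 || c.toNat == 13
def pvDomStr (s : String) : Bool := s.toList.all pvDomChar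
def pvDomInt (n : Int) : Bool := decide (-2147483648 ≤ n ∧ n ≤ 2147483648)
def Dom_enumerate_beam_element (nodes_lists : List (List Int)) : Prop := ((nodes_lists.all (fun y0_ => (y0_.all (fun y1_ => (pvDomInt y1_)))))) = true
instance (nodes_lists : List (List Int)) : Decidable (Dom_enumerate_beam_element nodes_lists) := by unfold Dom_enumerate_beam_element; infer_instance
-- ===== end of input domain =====

-- B builds the result back-to-front with no running counter: each beam prepends its zero-based range and shifts the whole partial result (alternative decomposition, not faster).

-- ===== PORT A =====
-- literal port of A's loop: state = (number_of_elements, elements_lists)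
def enumerate_beam_element (nodes_lists : List (List Int)) : List (List Int) :=
  (nodes_lists.foldl
    (fun s nodes_list =>
      let number_of_elements_toadd : Int := (nodes_list.length : Int) - 1
      let new_number_of_elements : Int := s.1 + number_of_elements_toadd
      (new_number_of_elements,
       s.2 ++ [PySem.List.pyRange s.1 new_number_of_elements 1]))
    ((0 : Int), ([] : List (List Int)))).2

-- ===== PORT B =====
-- Source B: for nodes_list in reversed(nodes_lists): result = [list(range(shift))] + [[e+shift for e in ys] for ys in result]
def enumerate_beam_element_alt (nodes_lists : List (List Int)) : List (List Int) :=
  nodes_lists.reverse.foldl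
    (fun result nodes_list =>
      let shift : Int := (nodes_list.length : Int) - 1
      PySem.List.pyRange 0 shift 1 :: result.map (fun ys => ys.map (fun e => e + shift)))
    []

-- ===== PRECONDITION & SPEC =====
def Spec_enumerate_beam_element (nodes_lists : List (List Int)) (out : List (List Int)) : Prop := out = enumerate_beam_element_alt nodes_lists
instance (nodes_lists : List (List Int)) (out : List (List Int)) : Decidable (Spec_enumerate_beam_element nodes_lists out) := by unfold Spec_enumerate_beam_element; infer_instance

-- ===== CLAIM =====
def Claim_equal_enumerate_beam_element : Prop := ∀ (nodes_lists : List (List Int)), Dom_enumerate_beam_element nodes_lists → Spec_enumerate_beam_element nodes_lists (enumerate_beam_element nodes_lists)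

-- ===== LEMMAS AND PROOFS =====

-- reference form: the list of ranges starting from counter c
def ebeRanges (c : Int) : List (List Int) → List (List Int)
  | [] => []
  | n :: rest =>
      PySem.List.pyRange c (c + (n.length : Int) - 1) 1 ::
        ebeRanges (c + (n.length : Int) - 1) rest

theorem ebe_A_loop (ls : List (List Int)) : ∀ (c : Int) (acc : List (List Int)),
    (ls.foldl
      (fun s nodes_list =>
        let number_of_elements_toadd : Int := (nodes_list.length : Int) - 1
        let new_number_of_elements : Int := s.1 + number_of_elements_toadd
        (new_number_of_elements,
         s.2 ++ [PySem.List.pyRange s.1 new_number_of_elements 1]))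
      (c, acc)).2 = acc ++ ebeRanges c ls := by
  induction ls with
  | nil => intro c acc; simp [ebeRanges]
  | cons n rest ih =>
      intro c acc
      simp only [List.foldl_cons, ebeRanges, ih]
      simp [add_sub_assoc]

theorem ebe_map_add (a b c : Int) :
    (PySem.List.pyRange a b 1).map (fun e => e + c) = PySem.List.pyRange (a + c) (b + c) 1 := by
  rw [PySem.List.pyRange_one, PySem.List.pyRange_one]
  have h : b + c - (a + c) = b - a := by ring
  rw [h, List.map_map]
  exact List.map_congr_left (fun k _ => by simp [Function.comp]; ring)

theorem ebe_ranges_shift (ls : List (List Int)) : ∀ (d c : Int),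
    (ebeRanges d ls).map (fun ys => ys.map (fun e => e + c)) = ebeRanges (d + c) ls := by
  induction ls with
  | nil => intro d c; simp [ebeRanges]
  | cons n rest ih =>
      intro d c
      simp only [ebeRanges, List.map_cons, ebe_map_add, ih]
      have h1 : d + (n.length : Int) - 1 + c = d + c + (n.length : Int) - 1 := by ring
      rw [h1]

theorem ebe_B_eq (ls : List (List Int)) : enumerate_beam_element_alt ls = ebeRanges 0 ls := by
  unfold enumerate_beam_element_alt
  rw [List.foldl_reverse]
  induction ls with
  | nil => simp [ebeRanges]
  | cons n rest ih =>
      simp only [List.foldr_cons, ih, ebe_ranges_shift, ebeRanges]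
      norm_num

-- ===== VERDICT =====
theorem enumerate_beam_element_spec : Claim_equal_enumerate_beam_element := by
  intro nodes_lists _
  unfold Spec_enumerate_beam_element enumerate_beam_element
  rw [ebe_A_loop nodes_lists 0 [], ebe_B_eq]
  simp
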